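-- pv_equiv track=rewrite | github.com/OrthoFinder/OrthoFinder | tools/ncbi_primary_transcripts.py | get_longest_transcripts
-- ===== SOURCE A (Python) =====
-- from collections import defaultdict
--
-- def get_longest_transcripts(protein_dict, gene_map):
--     """Find the longest protein sequence for each gene."""
--     gene_transcripts = defaultdict(list)
--
--     # Group protein sequences by gene
--     for protein_id, sequence in protein_dict.items():
--         if protein_id in gene_map:
--             gene = gene_map[protein_id]
--             gene_transcripts[gene].append((protein_id, sequence))
--
--     # For each gene, select the longest transcript
--     longest_transcripts = {}
--     for gene, transcripts in gene_transcripts.items():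
--         longest_protein = max(transcripts, key=lambda x: len(x[1]))
--         longest_transcripts[gene] = longest_protein
--
--     return longest_transcripts
-- ===== SOURCE B (Python) =====
-- def get_longest_transcripts(protein_dict, gene_map):
--     """Single pass: keep the longest (protein_id, sequence) seen so far for each gene."""
--     best = {}
--     for protein_id, sequence in protein_dict.items():
--         gene = gene_map.get(protein_id)
--         if gene is None:
--             continue
--         cur = best.get(gene)
--         if cur is None or len(sequence) > len(cur[1]):
--             best[gene] = (protein_id, sequence)
--     return best
-- ===== Notes on version B (the rewrite author's own statement) =====
-- stated objective: simpler
-- what changed: Replaces the group-into-per-gene-lists-then-max two-phase algorithm with a single pass that keeps a running best (strictly-longer wins, so ties keep the first protein) per gene in one dict, eliminating the intermediate transcript lists.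
import Mathlib
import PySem

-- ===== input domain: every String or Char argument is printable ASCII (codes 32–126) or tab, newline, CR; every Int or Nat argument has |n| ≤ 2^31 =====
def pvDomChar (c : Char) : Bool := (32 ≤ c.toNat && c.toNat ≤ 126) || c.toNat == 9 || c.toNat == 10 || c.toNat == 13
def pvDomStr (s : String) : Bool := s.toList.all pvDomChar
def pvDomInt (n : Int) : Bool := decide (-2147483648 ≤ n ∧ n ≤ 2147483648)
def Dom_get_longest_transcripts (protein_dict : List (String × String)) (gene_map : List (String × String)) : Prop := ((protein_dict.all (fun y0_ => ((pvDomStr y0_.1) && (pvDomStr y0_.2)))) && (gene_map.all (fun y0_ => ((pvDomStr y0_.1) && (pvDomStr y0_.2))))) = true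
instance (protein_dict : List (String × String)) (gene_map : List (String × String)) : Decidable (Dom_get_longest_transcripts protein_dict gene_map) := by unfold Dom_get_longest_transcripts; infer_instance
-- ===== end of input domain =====

-- B replaces A's two-phase "group transcripts per gene, then take the max" with a single
-- pass keeping the running longest transcript per gene (simpler: no intermediate lists).


-- ===== PORT A =====
def get_longest_transcripts (protein_dict : List (String × String)) (gene_map : List (String × String)) : List (String × String × String) :=
  -- gene_transcripts = defaultdict(list); group (protein_id, sequence) by gene
  let gmd : PySem.Dict String String := PySem.Dict.mk gene_map
  let gene_transcripts : PySem.Dict String (List (String × String)) :=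
    protein_dict.foldl (fun d pr =>
      match gmd.get? pr.1 with                    -- 'if protein_id in gene_map: gene = gene_map[protein_id]'
      | some gene => d.modify gene [] (fun ts => ts ++ [pr])   -- gene_transcripts[gene].append(...)
      | none => d) PySem.Dict.empty
  -- longest_transcripts[gene] = max(transcripts, key=lambda x: len(x[1]))
  let longest_transcripts : PySem.Dict String (String × String) :=
    gene_transcripts.items.foldl (fun out gp =>
      out.insert gp.1 ((PySem.List.max? gp.2 (fun x => PySem.Str.len x.2)).getD ("", ""))) PySem.Dict.empty
  longest_transcripts.items

-- ===== PORT B =====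
def get_longest_transcripts_alt (protein_dict : List (String × String)) (gene_map : List (String × String)) : List (String × String × String) :=
  let gmd : PySem.Dict String String := PySem.Dict.mk gene_map
  (protein_dict.foldl (fun best pr =>
      match gmd.get? pr.1 with                    -- gene = gene_map.get(protein_id)
      | none => best                              -- continue
      | some gene =>
        match best.get? gene with                 -- cur = best.get(gene)
        | none => best.insert gene pr
        | some cur => if PySem.Str.len cur.2 < PySem.Str.len pr.2 then best.insert gene pr else best)
    PySem.Dict.empty).items

-- ===== PRECONDITION & SPEC =====
def Spec_get_longest_transcripts (protein_dict : List (String × String)) (gene_map : List (String × String)) (out : List (String × String × String)) : Prop := out = get_longest_transcripts_alt protein_dict gene_map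
instance (protein_dict : List (String × String)) (gene_map : List (String × String)) (out : List (String × String × String)) : Decidable (Spec_get_longest_transcripts protein_dict gene_map out) := by unfold Spec_get_longest_transcripts; infer_instance

-- ===== CLAIM (what is proved, stated in full; the proofs are below) =====
def Claim_equal_get_longest_transcripts : Prop := ∀ (protein_dict : List (String × String)) (gene_map : List (String × String)), Dom_get_longest_transcripts protein_dict gene_map → Spec_get_longest_transcripts protein_dict gene_map (get_longest_transcripts protein_dict gene_map)

-- ===== LEMMAS AND PROOFS =====

-- A's grouping step, B's running-best step, and the per-gene "longest" projection.
def pvStepA (gmd : PySem.Dict String String) (d : PySem.Dict String (List (String × String))) (pr : String × String) : PySem.Dict String (List (String × String)) :=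
  match gmd.get? pr.1 with
  | some gene => d.modify gene [] (fun ts => ts ++ [pr])
  | none => d

def pvStepB (gmd : PySem.Dict String String) (best : PySem.Dict String (String × String)) (pr : String × String) : PySem.Dict String (String × String) :=
  match gmd.get? pr.1 with
  | none => best
  | some gene =>
    match best.get? gene with
    | none => best.insert gene pr
    | some cur => if PySem.Str.len cur.2 < PySem.Str.len pr.2 then best.insert gene pr else best

def pvBest (ts : List (String × String)) : String × String :=
  (PySem.List.max? ts (fun x => PySem.Str.len x.2)).getD ("", "")

def pvF (gp : String × List (String × String)) : String × String × String := (gp.1, pvBest gp.2)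

lemma pvF_fst (gp : String × List (String × String)) : (pvF gp).1 = gp.1 := rfl

lemma pvBest_append (ts : List (String × String)) (m pr : String × String)
    (hm : PySem.List.max? ts (fun x => PySem.Str.len x.2) = some m) :
    pvBest (ts ++ [pr]) = if PySem.Str.len m.2 < PySem.Str.len pr.2 then pr else m := by
  unfold pvBest
  simp only [PySem.List.max?] at hm ⊢
  rw [List.foldl_append, hm, List.foldl_cons, List.foldl_nil]
  change (if PySem.Str.len m.2 < PySem.Str.len pr.2 then some pr else some m).getD ("", "") = _
  split <;> rfl

-- the invariant relating the two folds
lemma pvInvariant (gmd : PySem.Dict String String) (pd : List (String × String)) :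
    (pd.foldl (pvStepB gmd) PySem.Dict.empty).items
      = (pd.foldl (pvStepA gmd) PySem.Dict.empty).items.map pvF
    ∧ (pd.foldl (pvStepA gmd) PySem.Dict.empty).keys.Nodup
    ∧ ∀ q ∈ (pd.foldl (pvStepA gmd) PySem.Dict.empty).items, q.2 ≠ [] := by
  induction pd using List.reverseRecOn with
  | nil => simp [PySem.Dict.empty, PySem.Dict.keys]
  | append_singleton pd pr ih =>
    obtain ⟨hitems, hnd, hne⟩ := ih
    set G := pd.foldl (pvStepA gmd) PySem.Dict.empty with hG
    set B := pd.foldl (pvStepB gmd) PySem.Dict.empty with hB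
    have hkeys : B.keys = G.keys := by
      show B.items.map Prod.fst = G.items.map Prod.fst
      rw [hitems, List.map_map]; rfl
    rw [List.foldl_append, List.foldl_append, List.foldl_cons, List.foldl_nil,
        List.foldl_cons, List.foldl_nil, ← hG, ← hB]
    unfold pvStepA pvStepB
    cases hlook : gmd.get? pr.1 with
    | none => exact ⟨hitems, hnd, hne⟩
    | some gene =>
      simp only []
      by_cases hc : G.contains gene = true
      · -- gene already grouped
        have hGget : ∃ ts, G.get? gene = some ts := by
          have := PySem.Dict.contains_eq_isSome_get? (d := G) (k := gene)
          rw [hc] at this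
          exact Option.isSome_iff_exists.mp this.symm
        obtain ⟨ts, hts⟩ := hGget
        have htsmem : (gene, ts) ∈ G.items :=
          (PySem.Dict.get?_eq_some_iff_mem_items G gene ts hnd).mp hts
        have htsne : ts ≠ [] := hne _ htsmem
        have hgetD : G.getD gene [] = ts := PySem.Dict.getD_of_get?_eq_some G [] hts
        -- unique entry at key gene
        have huniq : ∀ q ∈ G.items, q.1 = gene → q = (gene, ts) := by
          intro q hq hq1
          have : G.get? q.1 = some q.2 :=
            (PySem.Dict.get?_eq_some_iff_mem_items G q.1 q.2 hnd).mpr hq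
          rw [hq1, hts] at this
          obtain ⟨rfl⟩ := Option.some.inj this
          exact Prod.ext hq1 rfl
        -- max of the group so far
        obtain ⟨m, hm⟩ : ∃ m, PySem.List.max? ts (fun x => PySem.Str.len x.2) = some m := by
          cases h : PySem.List.max? ts (fun x => PySem.Str.len x.2) with
          | none => exact absurd ((PySem.List.max?_eq_none_iff ts _).mp h) htsne
          | some m => exact ⟨m, rfl⟩
        have hBget : B.get? gene = some m := by
          have hBnd : B.keys.Nodup := by rw [hkeys]; exact hnd
          have : (gene, m) ∈ B.items := by
            rw [hitems]
            have hmv : (PySem.List.max? ts (fun x => PySem.Str.len x.2)).getD ("", "") = m := by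
              rw [hm]; rfl
            have : pvF (gene, ts) = (gene, m) := by
              unfold pvF pvBest
              exact congrArg (Prod.mk gene) hmv
            exact this ▸ List.mem_map_of_mem htsmem
          exact (PySem.Dict.get?_eq_some_iff_mem_items B gene m hBnd).mpr this
        rw [hBget]
        change (if PySem.Str.len m.2 < PySem.Str.len pr.2 then B.insert gene pr else B).items = _ ∧ _
        have hmodify : G.modify gene [] (fun t => t ++ [pr]) = G.insert gene (ts ++ [pr]) := by
          rw [PySem.Dict.modify, hgetD]
        have hGitems' : (G.modify gene [] (fun t => t ++ [pr])).items
            = G.items.map (fun q => if q.1 == gene then (gene, ts ++ [pr]) else q) := by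
          rw [hmodify, PySem.Dict.items_insert_of_contains G _ hc]
        have hmax : pvBest (ts ++ [pr]) = if PySem.Str.len m.2 < PySem.Str.len pr.2 then pr else m :=
          pvBest_append ts m pr hm
        have hnd' : (G.modify gene [] (fun t => t ++ [pr])).keys.Nodup := by
          rw [hmodify]; exact PySem.Dict.nodup_keys_insert G gene _ hnd
        have hne' : ∀ q ∈ (G.modify gene [] (fun t => t ++ [pr])).items, q.2 ≠ [] := by
          rw [hGitems']
          intro q hq
          obtain ⟨q', hq', rfl⟩ := List.mem_map.mp hq
          by_cases h : q'.1 == gene <;> simp [h]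
          exact hne _ hq'
        refine ⟨?_, hnd', hne'⟩
        -- items equation
        rw [hGitems', List.map_map]
        by_cases hcmp : PySem.Str.len m.2 < PySem.Str.len pr.2
        · rw [if_pos hcmp]
          have hBc : B.contains gene = true := by
            rw [PySem.Dict.contains_eq_isSome_get?, hBget]; rfl
          rw [PySem.Dict.items_insert_of_contains B pr hBc, hitems, List.map_map]
          apply List.map_congr_left
          intro q hq
          by_cases h : q.1 == gene
          · show (if ((pvF q).1 == gene) = true then (gene, pr) else pvF q)
                = pvF (if (q.1 == gene) = true then (gene, ts ++ [pr]) else q)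
            rw [pvF_fst q, if_pos h, if_pos h]
            show ((gene : String), pr) = (gene, pvBest (ts ++ [pr]))
            rw [hmax, if_pos hcmp]
          · simp only [Function.comp]
            simp [pvF, h]
        · rw [if_neg hcmp, hitems]
          apply List.map_congr_left
          intro q hq
          by_cases h : q.1 == gene
          · have hq' : q = (gene, ts) := huniq q hq (by exact eq_of_beq h)
            subst hq'
            show pvF (gene, ts) = pvF (if (((gene, ts) : String × List (String × String)).1 == gene) = true then (gene, ts ++ [pr]) else (gene, ts))
            rw [if_pos h]
            show ((gene : String), pvBest ts) = (gene, pvBest (ts ++ [pr]))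
            rw [hmax, if_neg hcmp]
            unfold pvBest
            rw [hm]
            rfl
          · simp only [Function.comp]
            simp [pvF, h]
      · -- fresh gene
        have hc' : G.contains gene = false := by simpa using hc
        have hGget : G.get? gene = none := by
          have := PySem.Dict.contains_eq_isSome_get? (d := G) (k := gene)
          rw [hc'] at this
          exact Option.not_isSome_iff_eq_none.mp (by rw [← this]; simp)
        have hgetD : G.getD gene [] = [] := PySem.Dict.getD_of_not_contains G [] hc'
        have hBget : B.get? gene = none := by
          have hBc : B.contains gene = false := by
            rw [PySem.Dict.contains_eq_decide_mem_keys, hkeys, ← PySem.Dict.contains_eq_decide_mem_keys]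
            exact hc'
          have := PySem.Dict.contains_eq_isSome_get? (d := B) (k := gene)
          rw [hBc] at this
          exact Option.not_isSome_iff_eq_none.mp (by rw [← this]; simp)
        rw [hBget]
        change (B.insert gene pr).items = _ ∧ _
        have hmodify : G.modify gene [] (fun t => t ++ [pr]) = G.insert gene [pr] := by
          rw [PySem.Dict.modify, hgetD]; rfl
        have hBc : B.contains gene = false := by
          rw [PySem.Dict.contains_eq_decide_mem_keys, hkeys, ← PySem.Dict.contains_eq_decide_mem_keys]
          exact hc'
        refine ⟨?_, ?_, ?_⟩
        · rw [hmodify, PySem.Dict.items_insert_of_not_contains G _ hc',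
              PySem.Dict.items_insert_of_not_contains B _ hBc, hitems, List.map_append]
          rfl
        · rw [hmodify]; exact PySem.Dict.nodup_keys_insert G gene _ hnd
        · rw [hmodify, PySem.Dict.items_insert_of_not_contains G _ hc']
          intro q hq
          rcases List.mem_append.mp hq with h | h
          · exact hne _ h
          · simp at h; subst h; simp

-- ===== VERDICT (by name: the statement is the Claim_ definition above) =====
theorem get_longest_transcripts_spec : Claim_equal_get_longest_transcripts := by
  intro protein_dict gene_map _
  unfold Spec_get_longest_transcripts get_longest_transcripts get_longest_transcripts_alt
  simp only []
  obtain ⟨hitems, hnd, _⟩ := pvInvariant (PySem.Dict.mk gene_map) protein_dict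
  rw [show (fun (d : PySem.Dict String (List (String × String))) (pr : String × String) =>
        match (PySem.Dict.mk gene_map).get? pr.1 with
        | some gene => d.modify gene [] (fun ts => ts ++ [pr])
        | none => d) = pvStepA (PySem.Dict.mk gene_map) from rfl]
  rw [show (fun (best : PySem.Dict String (String × String)) (pr : String × String) =>
        match (PySem.Dict.mk gene_map).get? pr.1 with
        | none => best
        | some gene =>
          match best.get? gene with
          | none => best.insert gene pr
          | some cur => if PySem.Str.len cur.2 < PySem.Str.len pr.2 then best.insert gene pr else best)
      = pvStepB (PySem.Dict.mk gene_map) from rfl]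
  rw [PySem.Dict.items_foldl_insert_fresh (k := Prod.fst)
        (v := fun gp => (PySem.List.max? gp.2 (fun x => PySem.Str.len x.2)).getD ("", ""))]
  · show [] ++ List.map pvF _ = _
    rw [List.nil_append, ← hitems]
  · intro a _; exact PySem.Dict.contains_empty _
  · exact hnd
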